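-- pv_equiv track=rewrite | github.com/vishalbelsare/kg-gen | tests/test_basic.py | match_subset
-- ===== SOURCE A (Python) =====
-- def match_subset(set1: set[str], set2: set[str]) -> bool:
--     """
--     Check if set1 is a subset of set2, with fuzzy matching for similar names.
--     set1, must be the expected set, and should contain less words for an entity, so fuzzy matching works in case.
--     """
--     diff = set1 - set2
--
--     if len(diff) == 0:
--         return True
--
--     # Check for fuzzy matches for remaining entities
--     for entity1 in diff:
--         found_match = False
--         for entity2 in set2:
--             if entity1.lower() in entity2.lower() or entity2.lower() in entity1.lower():
--                 found_match = True
--                 break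
--         if not found_match:
--             return False
--
--     return True
-- ===== SOURCE B (Python) =====
-- def match_subset(set1: set[str], set2: set[str]) -> bool:
--     """Fuzzy subset check by worklist elimination: sweep set2 once, removing
--     from a pending list every set1 element it substring-matches."""
--     pending = [e1.lower() for e1 in set1]
--     for e2 in set2:
--         t = e2.lower()
--         pending = [p for p in pending if not (p in t or t in p)]
--         if not pending:
--             return True
--     return not pending
-- ===== Notes on version B (the rewrite author's own statement) =====
-- stated objective: alternative
-- what changed: Inverts the loop nesting: instead of A's set-difference pre-filter followed by a nested per-element scan of set2, B sweeps set2 once while eliminating matched elements from a pending worklist of pre-lowercased set1 elements, returning True as soon as the worklist empties; exact set2 members self-match, so the dropped pre-filter is sound. Each string is lowercased once instead of per comparison, and the worklist shrinks.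
import Mathlib
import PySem

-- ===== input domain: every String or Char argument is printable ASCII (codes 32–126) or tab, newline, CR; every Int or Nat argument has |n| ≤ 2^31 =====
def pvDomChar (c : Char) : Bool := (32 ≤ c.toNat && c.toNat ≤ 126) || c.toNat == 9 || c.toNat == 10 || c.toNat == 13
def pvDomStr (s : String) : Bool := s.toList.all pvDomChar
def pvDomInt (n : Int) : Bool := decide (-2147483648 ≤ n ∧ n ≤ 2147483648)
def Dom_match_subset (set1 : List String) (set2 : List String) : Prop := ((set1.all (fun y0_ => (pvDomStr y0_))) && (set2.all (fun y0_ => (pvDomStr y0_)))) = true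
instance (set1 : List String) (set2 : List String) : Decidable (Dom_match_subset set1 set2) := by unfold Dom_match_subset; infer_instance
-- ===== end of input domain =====

-- B inverts A's loop nesting: one sweep over set2 eliminating matched elements from a
-- pending worklist of pre-lowercased set1 elements (objective: alternative algorithm).

-- ===== PORT A =====
-- inner 'for entity2 in set2: … break' loop of A (found_match accumulator, break on first hit)
def pvInnerA (entity1 : String) : List String → Bool
  | [] => false
  | entity2 :: rest =>
    if PySem.Str.isIn (PySem.Str.lower entity1) (PySem.Str.lower entity2)
        || PySem.Str.isIn (PySem.Str.lower entity2) (PySem.Str.lower entity1) then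
      true
    else
      pvInnerA entity1 rest

-- outer 'for entity1 in diff: …' loop of A (early 'return False')
def pvOuterA (set2 : List String) : List String → Bool
  | [] => true
  | entity1 :: rest =>
    let found_match := pvInnerA entity1 set2
    if !found_match then false else pvOuterA set2 rest

def match_subset (set1 : List String) (set2 : List String) : Bool :=
  let diff := PySem.Set.diff set1 set2
  if PySem.Set.len diff == 0 then true
  else pvOuterA set2 diff

-- ===== PORT B =====
-- 'for e2 in set2:' worklist loop of B: filter pending, early 'return True' when empty
def pvGoB : List String → List String → Bool
  | pending, [] => pending.isEmpty
  | pending, e2 :: rest =>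
    let t := PySem.Str.lower e2
    let pending' := pending.filter (fun p => !(PySem.Str.isIn p t || PySem.Str.isIn t p))
    if pending'.isEmpty then true else pvGoB pending' rest

def match_subset_alt (set1 : List String) (set2 : List String) : Bool :=
  pvGoB (set1.map PySem.Str.lower) set2

-- ===== PRECONDITION & SPEC =====
def Spec_match_subset (set1 : List String) (set2 : List String) (out : Bool) : Prop := out = match_subset_alt set1 set2
instance (set1 : List String) (set2 : List String) (out : Bool) : Decidable (Spec_match_subset set1 set2 out) := by unfold Spec_match_subset; infer_instance

-- ===== CLAIM (what is proved, stated in full; the proofs are below) =====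
def Claim_equal_match_subset : Prop := ∀ (set1 : List String) (set2 : List String), Dom_match_subset set1 set2 → Spec_match_subset set1 set2 (match_subset set1 set2)

-- ===== LEMMAS AND PROOFS =====

-- the fuzzy test on already-lowered strings
def pvFz (p t : String) : Bool := PySem.Str.isIn p t || PySem.Str.isIn t p

-- A's fuzzy test
def pvFuzzy (e1 e2 : String) : Bool := pvFz (PySem.Str.lower e1) (PySem.Str.lower e2)

lemma pvInnerA_eq_any (e1 : String) (l : List String) :
    pvInnerA e1 l = l.any (pvFuzzy e1) := by
  induction l with
  | nil => rfl
  | cons h t ih =>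
    show (if pvFuzzy e1 h = true then true else pvInnerA e1 t) = _
    rw [List.any_cons, ← ih]
    cases hf : pvFuzzy e1 h <;> simp

lemma pvOuterA_eq_all (set2 : List String) (l : List String) :
    pvOuterA set2 l = l.all (fun e1 => set2.any (pvFuzzy e1)) := by
  induction l with
  | nil => rfl
  | cons h t ih =>
    show (if !pvInnerA h set2 then false else pvOuterA set2 t) = _
    rw [List.all_cons, ← ih, pvInnerA_eq_any]
    cases hf : set2.any (pvFuzzy h) <;> simp

lemma pvFuzzy_self (e : String) : pvFuzzy e e = true := by
  have h : PySem.Str.isIn (PySem.Str.lower e) (PySem.Str.lower e) = true :=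
    (PySem.Str.isIn_iff_infix _ _).mpr (List.infix_refl _)
  simp only [pvFuzzy, pvFz, h, Bool.or_self]

lemma pvSelf_match {e : String} {set2 : List String} (h : e ∈ set2) :
    set2.any (pvFuzzy e) = true :=
  List.any_eq_true.mpr ⟨e, h, pvFuzzy_self e⟩

-- filtering out elements already in set2 does not change the all-check (they self-match)
lemma pvAll_filter (set1 set2 : List String) :
    (set1.filter (fun x => !PySem.Set.contains set2 x)).all
        (fun e1 => set2.any (pvFuzzy e1))
      = set1.all (fun e1 => set2.any (pvFuzzy e1)) := by
  induction set1 with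
  | nil => rfl
  | cons h t ih =>
    rw [List.filter_cons]
    by_cases hm : PySem.Set.contains set2 h = true
    · have hmem : h ∈ set2 := (PySem.Set.contains_iff set2 h).mp hm
      rw [if_neg (by rw [hm]; simp), ih, List.all_cons, pvSelf_match hmem, Bool.true_and]
    · have hb : PySem.Set.contains set2 h = false := Bool.eq_false_iff.mpr hm
      rw [if_pos (by rw [hb]; rfl), List.all_cons, List.all_cons, ih]

-- if the filtered list is empty, every element of set1 is in set2 and the all-check is true
lemma pvAll_of_diff_nil {set1 set2 : List String}
    (h : set1.filter (fun x => !PySem.Set.contains set2 x) = []) :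
    set1.all (fun e1 => set2.any (pvFuzzy e1)) = true := by
  rw [← pvAll_filter, h]; rfl

-- A's result as an all/any formula
lemma pvA_eq (set1 set2 : List String) :
    match_subset set1 set2 = set1.all (fun e1 => set2.any (pvFuzzy e1)) := by
  unfold match_subset
  simp only [PySem.Set.diff, PySem.Set.len]
  split_ifs with h
  · have h0 : ((List.filter (fun x => !PySem.Set.contains set2 x) set1).length : Int) = 0 :=
      eq_of_beq h
    have hnil : set1.filter (fun x => !PySem.Set.contains set2 x) = [] :=
      List.length_eq_zero_iff.mp (by exact_mod_cast h0)
    exact (pvAll_of_diff_nil hnil).symm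
  · rw [pvOuterA_eq_all, pvAll_filter]

-- dropping the elements matched by t from the worklist keeps the remaining check equal
lemma pvFilter_step (pending : List String) (t : String) (g : String → Bool) :
    (pending.filter (fun p => !pvFz p t)).all g
      = pending.all (fun p => pvFz p t || g p) := by
  induction pending with
  | nil => rfl
  | cons h rest ih =>
    simp only [List.filter_cons, List.all_cons]
    cases hf : pvFz h t <;> simp [ih]

-- one worklist-filtering step equals peeling one element off the any-scan
lemma pvStep_all (pending : List String) (t0 : String) (rest : List String) :
    pending.all (fun p => (t0 :: rest).any (fun e2 => pvFz p (PySem.Str.lower e2)))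
      = (pending.filter (fun p => !pvFz p (PySem.Str.lower t0))).all
          (fun p => rest.any (fun e2 => pvFz p (PySem.Str.lower e2))) := by
  rw [pvFilter_step]
  exact List.all_congr rfl (fun p => by rw [List.any_cons])

-- B's worklist loop computes the all/any formula over the pending list
lemma pvGoB_eq (l : List String) :
    ∀ pending : List String,
      pvGoB pending l = pending.all (fun p => l.any (fun e2 => pvFz p (PySem.Str.lower e2))) := by
  induction l with
  | nil =>
    intro pending
    show pending.isEmpty = _
    cases pending <;> simp
  | cons e2 rest ih =>
    intro pending
    show (if (pending.filter (fun p =>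
            !(PySem.Str.isIn p (PySem.Str.lower e2) || PySem.Str.isIn (PySem.Str.lower e2) p))).isEmpty
          then true
          else pvGoB (pending.filter (fun p =>
            !(PySem.Str.isIn p (PySem.Str.lower e2) || PySem.Str.isIn (PySem.Str.lower e2) p))) rest) = _
    have hfz : (fun p => !(PySem.Str.isIn p (PySem.Str.lower e2) || PySem.Str.isIn (PySem.Str.lower e2) p))
        = (fun p => !pvFz p (PySem.Str.lower e2)) := rfl
    rw [hfz, pvStep_all pending e2 rest]
    split_ifs with h
    · rw [List.isEmpty_iff.mp h]; rfl
    · exact ih _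

-- ===== VERDICT (by name: the statement is the Claim_ definition above) =====
theorem match_subset_spec : Claim_equal_match_subset := by
  intro set1 set2 _
  unfold Spec_match_subset match_subset_alt
  rw [pvA_eq, pvGoB_eq, List.all_map]
  rfl
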